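-- pv_equiv track=rewrite | github.com/paiml/depyler | examples/hard_realworld_log_parse.py | count_by_severity
-- ===== SOURCE A (Python) =====
-- def log_find_bracket(text: str, start: int) -> int:
--     """Find first ] in text from start. Returns -1 if not found."""
--     idx: int = start
--     while idx < len(text):
--         if text[idx] == "]":
--             return idx
--         idx = idx + 1
--     return -1
--
-- def log_find_colon(text: str, start: int) -> int:
--     """Find first : in text from start. Returns -1 if not found."""
--     idx: int = start
--     while idx < len(text):
--         if text[idx] == ":":
--             return idx
--         idx = idx + 1
--     return -1
--
-- def log_find_space(text: str, start: int) -> int: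
--     """Find first space in text from start. Returns -1 if not found."""
--     idx: int = start
--     while idx < len(text):
--         if text[idx] == " ":
--             return idx
--         idx = idx + 1
--     return -1
--
-- def log_substr(text: str, start: int, end: int) -> str:
--     """Extract substring from start to end (exclusive)."""
--     result: str = ""
--     idx: int = start
--     while idx < end and idx < len(text):
--         result = result + text[idx]
--         idx = idx + 1
--     return result
--
-- def log_strip(text: str) -> str:
--     """Remove leading and trailing spaces."""
--     start: int = 0
--     while start < len(text) and text[start] == " ":
--         start = start + 1
--     end: int = len(text)
--     while end > start and text[end - 1] == " ":
--         end = end - 1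
--     return log_substr(text, start, end)
--
-- def parse_level(line: str) -> str:
--     """Extract severity level from log line."""
--     bracket_end: int = log_find_bracket(line, 0)
--     if bracket_end == -1:
--         return ""
--     rest: str = log_substr(line, bracket_end + 1, len(line))
--     rest = log_strip(rest)
--     colon_pos: int = log_find_colon(rest, 0)
--     space_pos: int = log_find_space(rest, 0)
--     if colon_pos != -1:
--         return log_substr(rest, 0, colon_pos)
--     if space_pos != -1:
--         return log_substr(rest, 0, space_pos)
--     return rest
--
-- def to_upper(text: str) -> str:
--     """Convert string to uppercase."""
--     result: str = ""
--     idx: int = 0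
--     while idx < len(text):
--         ch: str = text[idx]
--         code: int = ord(ch)
--         if code >= 97 and code <= 122:
--             result = result + chr(code - 32)
--         else:
--             result = result + ch
--         idx = idx + 1
--     return result
--
-- def classify_severity(level_str: str) -> int:
--     """Classify log level. 0=unknown,1=debug,2=info,3=warn,4=error,5=fatal."""
--     upper: str = to_upper(level_str)
--     if upper == "DEBUG":
--         return 1
--     if upper == "INFO":
--         return 2
--     if upper == "WARN" or upper == "WARNING":
--         return 3
--     if upper == "ERROR":
--         return 4
--     if upper == "FATAL" or upper == "CRITICAL":
--         return 5
--     return 0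
--
-- def count_by_severity(lines: list[str]) -> list[int]:
--     """Count log lines by severity. Returns [unknown, debug, info, warn, error, fatal]."""
--     counts: list[int] = [0, 0, 0, 0, 0, 0]
--     idx: int = 0
--     while idx < len(lines):
--         level: str = parse_level(lines[idx])
--         sev: int = classify_severity(level)
--         counts[sev] = counts[sev] + 1
--         idx = idx + 1
--     return counts
-- ===== SOURCE B (Python) =====
-- def _parse_level(line: str) -> str:
--     pos = line.find("]")
--     if pos == -1:
--         return ""
--     rest = line[pos + 1:].strip(" ")
--     c = rest.find(":")
--     if c != -1:
--         return rest[:c]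
--     s = rest.find(" ")
--     if s != -1:
--         return rest[:s]
--     return rest
--
-- _TABLE = {"DEBUG": 1, "INFO": 2, "WARN": 3, "WARNING": 3,
--           "ERROR": 4, "FATAL": 5, "CRITICAL": 5}
--
-- def _classify(level_str: str) -> int:
--     upper = "".join(chr(ord(ch) - 32) if "a" <= ch <= "z" else ch
--                     for ch in level_str)
--     return _TABLE.get(upper, 0)
--
-- def count_by_severity(lines: list[str]) -> list[int]:
--     levels = [_parse_level(line) for line in lines]
--     freq = {}
--     for lvl in levels:
--         freq[lvl] = freq.get(lvl, 0) + 1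
--     counts = [0, 0, 0, 0, 0, 0]
--     for lvl, n in freq.items():
--         counts[_classify(lvl)] += n
--     return counts
-- ===== Notes on version B (the rewrite author's own statement) =====
-- stated objective: idiomatic
-- what changed: B parses each line with stdlib string operations (find/slice/strip) instead of A's hand-rolled per-character index loops, and replaces A's per-line bump loop by two passes: a frequency dict over parsed levels, then one classification per distinct level whose multiplicity is added to its severity bucket.
import Mathlib
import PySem

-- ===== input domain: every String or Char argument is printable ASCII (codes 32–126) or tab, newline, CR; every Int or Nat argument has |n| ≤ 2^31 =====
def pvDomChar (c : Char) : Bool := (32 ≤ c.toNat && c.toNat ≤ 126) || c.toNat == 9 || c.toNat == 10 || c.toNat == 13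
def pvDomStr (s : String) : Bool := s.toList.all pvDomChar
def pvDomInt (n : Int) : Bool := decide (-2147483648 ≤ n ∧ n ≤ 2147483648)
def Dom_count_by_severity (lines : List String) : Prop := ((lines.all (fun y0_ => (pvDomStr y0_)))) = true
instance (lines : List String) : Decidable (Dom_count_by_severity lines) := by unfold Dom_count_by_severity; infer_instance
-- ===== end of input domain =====

-- B replaces A's per-line bump loop by a two-pass decomposition (a frequency dict over parsed
-- levels, then one classification per DISTINCT level) and A's hand-rolled index loops by
-- stdlib string operations; objective: idiomatic (same asymptotics, measured constant-factor
-- speedup from C-level string primitives and per-distinct-level classification).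

-- ===== PORT A =====
-- A's three find helpers are the same index loop with a different target character;
-- ported once as logFindAux, instantiated three times (log_find_bracket/colon/space).
def logFindAux (cs : List Char) (c : Char) (idx : Int) : Int :=
  if h : idx < (cs.length : Int) then
    if PySem.List.pyGetD cs idx ' ' = c then idx
    else logFindAux cs c (idx + 1)
  else -1
termination_by ((cs.length : Int) - idx).toNat
decreasing_by omega

def log_find_bracket (text : List Char) (start : Int) : Int := logFindAux text ']' start
def log_find_colon (text : List Char) (start : Int) : Int := logFindAux text ':' start
def log_find_space (text : List Char) (start : Int) : Int := logFindAux text ' ' start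

def logSubstrAux (cs : List Char) (e : Int) (idx : Int) (result : List Char) : List Char :=
  if h : idx < e ∧ idx < (cs.length : Int) then
    logSubstrAux cs e (idx + 1) (result ++ [PySem.List.pyGetD cs idx ' '])
  else result
termination_by ((cs.length : Int) - idx).toNat
decreasing_by omega

def log_substr (text : List Char) (start e : Int) : List Char := logSubstrAux text e start []

def logStripStart (cs : List Char) (start : Int) : Int :=
  if h : start < (cs.length : Int) ∧ PySem.List.pyGetD cs start ' ' = ' ' then
    logStripStart cs (start + 1)
  else start
termination_by ((cs.length : Int) - start).toNat
decreasing_by omega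

def logStripEnd (cs : List Char) (start e : Int) : Int :=
  if h : e > start ∧ PySem.List.pyGetD cs (e - 1) ' ' = ' ' then
    logStripEnd cs start (e - 1)
  else e
termination_by (e - start).toNat
decreasing_by omega

def log_strip (text : List Char) : List Char :=
  log_substr text (logStripStart text 0)
    (logStripEnd text (logStripStart text 0) (text.length : Int))

def parse_level (line : List Char) : List Char :=
  let bracket_end := log_find_bracket line 0
  if bracket_end = -1 then []
  else
    let rest := log_strip (log_substr line (bracket_end + 1) (line.length : Int))
    let colon_pos := log_find_colon rest 0
    let space_pos := log_find_space rest 0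
    if colon_pos ≠ -1 then log_substr rest 0 colon_pos
    else if space_pos ≠ -1 then log_substr rest 0 space_pos
    else rest

def toUpperAux (cs : List Char) (idx : Int) (result : List Char) : List Char :=
  if h : idx < (cs.length : Int) then
    let ch := PySem.List.pyGetD cs idx ' '
    let code : Int := (ch.toNat : Int)
    toUpperAux cs (idx + 1)
      (result ++ [if 97 ≤ code ∧ code ≤ 122 then Char.ofNat (code - 32).toNat else ch])
  else result
termination_by ((cs.length : Int) - idx).toNat
decreasing_by omega

def to_upper (text : List Char) : List Char := toUpperAux text 0 []

def classify_severity (level_str : List Char) : Int :=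
  let upper := to_upper level_str
  if upper = "DEBUG".toList then 1
  else if upper = "INFO".toList then 2
  else if upper = "WARN".toList ∨ upper = "WARNING".toList then 3
  else if upper = "ERROR".toList then 4
  else if upper = "FATAL".toList ∨ upper = "CRITICAL".toList then 5
  else 0

def count_by_severity (lines : List String) : List Int :=
  lines.foldl
    (fun counts line =>
      let sev := classify_severity (parse_level line.toList)
      PySem.List.pySetD counts sev (PySem.List.pyGetD counts sev 0 + 1))
    [0, 0, 0, 0, 0, 0]

-- ===== PORT B =====
def parse_level_b (line : List Char) : List Char :=
  let pos := PySem.Chars.find line [']']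
  if pos = -1 then []
  else
    let rest := PySem.Chars.stripChars (PySem.List.slice line (some (pos + 1)) none) [' ']
    let c := PySem.Chars.find rest [':']
    if c ≠ -1 then PySem.List.slice rest none (some c)
    else
      let s := PySem.Chars.find rest [' ']
      if s ≠ -1 then PySem.List.slice rest none (some s)
      else rest

def sevTable : PySem.Dict (List Char) Int :=
  PySem.Dict.ofList
    [("DEBUG".toList, 1), ("INFO".toList, 2), ("WARN".toList, 3), ("WARNING".toList, 3),
     ("ERROR".toList, 4), ("FATAL".toList, 5), ("CRITICAL".toList, 5)]

def upCharB (ch : Char) : Char :=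
  if 'a' ≤ ch ∧ ch ≤ 'z' then Char.ofNat (ch.toNat - 32) else ch

def classify_b (level_str : List Char) : Int :=
  sevTable.getD (level_str.map upCharB) 0

def count_by_severity_alt (lines : List String) : List Int :=
  let levels := lines.map (fun line => parse_level_b line.toList)
  let freq := levels.foldl (fun d lvl => d.insert lvl (d.getD lvl 0 + 1))
    (PySem.Dict.empty : PySem.Dict (List Char) Int)
  freq.items.foldl
    (fun counts p =>
      let j := classify_b p.1
      PySem.List.pySetD counts j (PySem.List.pyGetD counts j 0 + p.2))
    [0, 0, 0, 0, 0, 0]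

-- ===== PRECONDITION & SPEC =====
def Spec_count_by_severity (lines : List String) (out : List Int) : Prop := out = count_by_severity_alt lines
instance (lines : List String) (out : List Int) : Decidable (Spec_count_by_severity lines out) := by unfold Spec_count_by_severity; infer_instance

-- ===== CLAIM (what is proved, stated in full; the proofs are below) =====
def Claim_equal_count_by_severity : Prop := ∀ (lines : List String), Dom_count_by_severity lines → Spec_count_by_severity lines (count_by_severity lines)

-- ===== LEMMAS AND PROOFS =====

lemma singleton_prefix_iff (c : Char) (l : List Char) : [c] <+: l ↔ l[0]? = some c := by
  cases l with
  | nil => simp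
  | cons a t => simp [List.cons_prefix_cons, eq_comm]

lemma findIdx?_char (cs : List Char) (c : Char) (j : Nat)
    (h : cs.findIdx? (fun x => x == c) = some j) :
    j < cs.length ∧ cs[j]? = some c ∧ ∀ i < j, cs[i]? ≠ some c := by
  obtain ⟨hj, hidx⟩ := List.findIdx?_eq_some_iff_findIdx_eq.mp h
  refine ⟨hj, ?_, ?_⟩
  · have := List.findIdx_getElem (p := fun x => x == c) (xs := cs) (w := by omega)
    simp [hidx] at this
    simp [List.getElem?_eq_getElem hj, this]
  · intro i hi hc
    have hi' : i < cs.length := by omega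
    have := List.not_of_lt_findIdx (p := fun x => x == c) (xs := cs) (i := i) (by omega)
    simp at this
    simp [List.getElem?_eq_getElem hi'] at hc
    exact this hc

lemma chars_find_singleton (cs : List Char) (c : Char) :
    PySem.Chars.find cs [c] =
      (match cs.findIdx? (fun x => x == c) with
       | some j => (j : Int)
       | none => -1) := by
  cases hfi : cs.findIdx? (fun x => x == c) with
  | none =>
    simp only []
    rw [PySem.Chars.find_eq_neg_one_iff]
    intro hinf
    have hc : c ∈ cs := hinf.mem (by simp)
    obtain ⟨j, hj, hcj⟩ := List.mem_iff_getElem.mp hc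
    have := List.findIdx?_eq_none_iff.mp hfi _ (by exact hcj ▸ List.getElem_mem hj)
    simp at this
  | some j =>
    obtain ⟨hj, hcj, hmin⟩ := findIdx?_char cs c j hfi
    have hinf : [c] <:+: cs := by
      have : [c] <+: cs.drop j := by
        rw [singleton_prefix_iff]
        simpa using hcj
      exact this.isInfix.trans (List.drop_suffix _ _).isInfix
    have hpos : 0 ≤ PySem.Chars.find cs [c] := (PySem.Chars.find_nonneg_iff _ _).mpr hinf
    obtain ⟨hpre, hmin'⟩ := PySem.Chars.find_spec hpos
    rw [singleton_prefix_iff] at hpre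
    rw [List.getElem?_drop] at hpre
    simp only [Nat.add_zero] at hpre
    have h1 : ¬ (PySem.Chars.find cs [c]).toNat < j := by
      intro hlt
      exact hmin _ hlt hpre
    have h2 : ¬ j < (PySem.Chars.find cs [c]).toNat := by
      intro hlt
      have := hmin' j hlt
      rw [singleton_prefix_iff, List.getElem?_drop, Nat.add_zero] at this
      exact this hcj
    simp only []
    omega

lemma logFindAux_eq (cs : List Char) (c : Char) (idx : Int) (h0 : 0 ≤ idx) :
    logFindAux cs c idx =
      (match (cs.drop idx.toNat).findIdx? (fun x => x == c) with
       | some j => idx + (j : Int)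
       | none => -1) := by
  fun_induction logFindAux cs c idx with
  | case1 idx h hc =>
    have hlt : idx.toNat < cs.length := by omega
    rw [List.drop_eq_getElem_cons hlt]
    rw [PySem.List.pyGetD_eq_getElem cs ' ' h0 h] at hc
    simp [List.findIdx?_cons, hc]
  | case2 idx h hc ih =>
    have hlt : idx.toNat < cs.length := by omega
    rw [List.drop_eq_getElem_cons hlt]
    rw [PySem.List.pyGetD_eq_getElem cs ' ' h0 h] at hc
    have h1 : (idx + 1).toNat = idx.toNat + 1 := by omega
    rw [ih (by omega)] at *
    simp only [List.findIdx?_cons, beq_iff_eq, hc, if_false, h1]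
    cases hfi : (cs.drop (idx.toNat + 1)).findIdx? (fun x => x == c) with
    | none => simp
    | some j =>
      simp
      ring
  | case3 idx h =>
    have : cs.length ≤ idx.toNat := by omega
    simp [List.drop_eq_nil_of_le this]

lemma logFindAux_zero (cs : List Char) (c : Char) :
    logFindAux cs c 0 = PySem.Chars.find cs [c] := by
  rw [logFindAux_eq cs c 0 le_rfl, chars_find_singleton]
  simp

lemma logSubstrAux_eq (cs : List Char) (e : Int) (idx : Int) (acc : List Char) (h0 : 0 ≤ idx) :
    logSubstrAux cs e idx acc = acc ++ ((cs.drop idx.toNat).take (e - idx).toNat) := by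
  fun_induction logSubstrAux cs e idx acc with
  | case1 idx acc h ih =>
    obtain ⟨he, hl⟩ := h
    rw [ih (by omega)]
    have hlt : idx.toNat < cs.length := by omega
    rw [List.drop_eq_getElem_cons hlt, PySem.List.pyGetD_eq_getElem cs ' ' h0 hl]
    have h1 : (idx + 1).toNat = idx.toNat + 1 := by omega
    have h2 : (e - idx).toNat = (e - (idx + 1)).toNat + 1 := by omega
    rw [h1, h2, List.take_succ_cons]
    simp
  | case2 idx acc h =>
    rcases Decidable.not_and_iff_or_not.mp h with he | hl
    · have : (e - idx).toNat = 0 := by omega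
      simp [this]
    · have : cs.length ≤ idx.toNat := by omega
      simp [List.drop_eq_nil_of_le this]

lemma log_substr_to_len (cs : List Char) (s : Int) (h0 : 0 ≤ s) :
    log_substr cs s (cs.length : Int) = cs.drop s.toNat := by
  rw [log_substr, logSubstrAux_eq cs _ s [] h0, List.nil_append]
  apply List.take_of_length_le
  simp
  omega

lemma log_substr_zero (cs : List Char) (e : Int) :
    log_substr cs 0 e = cs.take e.toNat := by
  rw [log_substr, logSubstrAux_eq cs e 0 [] le_rfl]
  simp

lemma logStripStart_eq (cs : List Char) (idx : Int) (h0 : 0 ≤ idx) :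
    logStripStart cs idx = idx + (((cs.drop idx.toNat).takeWhile (fun x => x == ' ')).length : Int) := by
  fun_induction logStripStart cs idx with
  | case1 idx h ih =>
    obtain ⟨hl, hc⟩ := h
    rw [ih (by omega)]
    have hlt : idx.toNat < cs.length := by omega
    rw [PySem.List.pyGetD_eq_getElem cs ' ' h0 hl] at hc
    rw [List.drop_eq_getElem_cons hlt]
    have h1 : (idx + 1).toNat = idx.toNat + 1 := by omega
    rw [List.takeWhile_cons]
    simp [hc, h1]
    omega
  | case2 idx h =>
    rcases Decidable.not_and_iff_or_not.mp h with hl | hc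
    · have : cs.length ≤ idx.toNat := by omega
      simp [List.drop_eq_nil_of_le this]
    · by_cases hl : idx < (cs.length : Int)
      · have hlt : idx.toNat < cs.length := by omega
        rw [PySem.List.pyGetD_eq_getElem cs ' ' h0 hl] at hc
        rw [List.drop_eq_getElem_cons hlt, List.takeWhile_cons]
        simp [hc]
      · have : cs.length ≤ idx.toNat := by omega
        simp [List.drop_eq_nil_of_le this]

lemma seg_decomp (cs : List Char) (s e : Int) (h0 : 0 ≤ s) (hgt : s < e)
    (he : e ≤ (cs.length : Int)) :
    List.drop s.toNat (List.take e.toNat cs) =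
      List.drop s.toNat (List.take (e - 1).toNat cs) ++ [cs[(e - 1).toNat]'(by omega)] := by
  have h1 : e.toNat = (e - 1).toNat + 1 := by omega
  rw [h1, List.take_add_one, List.getElem?_eq_getElem (by omega)]
  rw [Option.toList_some, List.drop_append_of_le_length]
  simp [List.length_take]
  omega

lemma length_seg (cs : List Char) (s e : Int) (h0 : 0 ≤ s) (hse : s ≤ e)
    (he : e ≤ (cs.length : Int)) :
    (List.drop s.toNat (List.take e.toNat cs)).length = e.toNat - s.toNat := by
  simp [List.length_drop, List.length_take]
  omega

lemma logStripEnd_eq (cs : List Char) (s e : Int) (h0 : 0 ≤ s) (hse : s ≤ e)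
    (he : e ≤ (cs.length : Int)) :
    logStripEnd cs s e =
      s + ((List.rdropWhile (fun x => x == ' ') ((cs.take e.toNat).drop s.toNat)).length : Int) := by
  fun_induction logStripEnd cs s e with
  | case1 e h ih =>
    obtain ⟨hgt, hc⟩ := h
    rw [ih (by omega) (by omega)]
    rw [PySem.List.pyGetD_eq_getElem cs ' ' (by omega) (by omega)] at hc
    rw [seg_decomp cs s e h0 (by omega) he, List.rdropWhile_concat]
    simp only [beq_iff_eq]
    rw [if_pos hc]
  | case2 e h =>
    by_cases hgt : e > s
    · have hc : ¬ PySem.List.pyGetD cs (e - 1) ' ' = ' ' := by tauto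
      rw [PySem.List.pyGetD_eq_getElem cs ' ' (by omega) (by omega)] at hc
      rw [seg_decomp cs s e h0 (by omega) he, List.rdropWhile_concat]
      simp only [beq_iff_eq]
      rw [if_neg hc]
      rw [List.length_append]
      have := length_seg cs s (e - 1) h0 (by omega) (by omega)
      rw [this]
      simp only [List.length_singleton]
      omega
    · have hes : e = s := by omega
      have hnil : List.drop s.toNat (List.take e.toNat cs) = [] :=
        List.drop_eq_nil_of_le (by simp; omega)
      rw [hnil]
      simp [hes]

lemma dropWhile_eq_drop_takeWhile (p : Char → Bool) (cs : List Char) :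
    cs.dropWhile p = cs.drop (cs.takeWhile p).length := by
  calc cs.dropWhile p
      = (cs.takeWhile p ++ cs.dropWhile p).drop (cs.takeWhile p).length := by
        rw [List.drop_left]
    _ = cs.drop (cs.takeWhile p).length := by rw [List.takeWhile_append_dropWhile]

lemma log_strip_eq (cs : List Char) :
    log_strip cs = List.rdropWhile (fun x => x == ' ') (cs.dropWhile (fun x => x == ' ')) := by
  have htw : (cs.takeWhile (fun x => x == ' ')).length ≤ cs.length :=
    (List.takeWhile_sublist _).length_le
  rw [log_strip, logStripStart_eq cs 0 le_rfl]
  simp only [Int.toNat_zero, List.drop_zero, zero_add]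
  set tw := (cs.takeWhile (fun x => x == ' ')).length with htwdef
  rw [logStripEnd_eq cs tw (cs.length : Int) (by omega) (by exact_mod_cast htw) le_rfl]
  rw [log_substr, logSubstrAux_eq _ _ _ _ (by omega)]
  rw [List.nil_append]
  have h1 : ((tw : Int) + ((List.rdropWhile (fun x => x == ' ')
      ((cs.take ((cs.length : Int)).toNat).drop (tw : Int).toNat)).length : Int) - (tw : Int)).toNat
      = (List.rdropWhile (fun x => x == ' ')
      ((cs.take ((cs.length : Int)).toNat).drop (tw : Int).toNat)).length := by omega
  rw [h1]
  have h2 : (cs.take ((cs.length : Int)).toNat) = cs := by simp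
  rw [h2]
  have h3 : ((tw : Int)).toNat = tw := by omega
  rw [h3]
  rw [← dropWhile_eq_drop_takeWhile]
  have hpre := List.rdropWhile_prefix (fun x => x == ' ') (cs.dropWhile (fun x => x == ' '))
  exact (List.prefix_iff_eq_take.mp hpre).symm

set_option maxRecDepth 4096 in
lemma stripChars_space (cs : List Char) :
    PySem.Chars.stripChars cs [' '] =
      List.rdropWhile (fun x => x == ' ') (cs.dropWhile (fun x => x == ' ')) := by
  have hp : (fun c => List.contains [' '] c) = (fun x => x == ' ') := by
    funext c
    by_cases h : c = ' ' <;> simp [h]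
  show (List.dropWhile (fun c => List.contains [' '] c)
      ((List.dropWhile (fun c => List.contains [' '] c) cs).reverse)).reverse = _
  rw [hp, List.rdropWhile]

lemma parse_eq (cs : List Char) : parse_level cs = parse_level_b cs := by
  simp only [parse_level, parse_level_b, log_find_bracket, log_find_colon, log_find_space,
    logFindAux_zero]
  by_cases hb : PySem.Chars.find cs [']'] = -1
  · simp [hb]
  · rw [if_neg hb, if_neg hb]
    have hb0 : 0 ≤ PySem.Chars.find cs [']'] + 1 := by
      have := PySem.Chars.neg_one_le_find cs [']']
      omega
    have hrest : log_strip (log_substr cs (PySem.Chars.find cs [']'] + 1) (cs.length : Int)) =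
        PySem.Chars.stripChars (PySem.List.slice cs (some (PySem.Chars.find cs [']'] + 1)) none)
          [' '] := by
      rw [PySem.List.slice_from _ hb0, log_substr_to_len _ _ hb0, log_strip_eq, stripChars_space]
    rw [hrest]
    set r := PySem.Chars.stripChars
      (PySem.List.slice cs (some (PySem.Chars.find cs [']'] + 1)) none) [' '] with hr
    split_ifs with h1 h2
    · rw [log_substr_zero, PySem.List.slice_to _ (by
        have := PySem.Chars.neg_one_le_find r [':']
        omega)]
    · rw [log_substr_zero, PySem.List.slice_to _ (by
        have := PySem.Chars.neg_one_le_find r [' ']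
        omega)]
    · rfl

lemma char_le_iff (a b : Char) : a ≤ b ↔ a.toNat ≤ b.toNat := by
  rw [Char.le_def, UInt32.le_iff_toNat_le]
  exact Iff.rfl

lemma upCharB_eq (ch : Char) :
    (if 97 ≤ (ch.toNat : Int) ∧ (ch.toNat : Int) ≤ 122
     then Char.ofNat ((ch.toNat : Int) - 32).toNat else ch) = upCharB ch := by
  rw [upCharB]
  have hc : ('a' ≤ ch ∧ ch ≤ 'z') ↔ (97 ≤ (ch.toNat : Int) ∧ (ch.toNat : Int) ≤ 122) := by
    rw [char_le_iff, char_le_iff]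
    have h1 : 'a'.toNat = 97 := rfl
    have h2 : 'z'.toNat = 122 := rfl
    rw [h1, h2]
    omega
  by_cases h : 'a' ≤ ch ∧ ch ≤ 'z'
  · rw [if_pos (hc.mp h), if_pos h]
    congr 1
    omega
  · rw [if_neg (fun hh => h (hc.mpr hh)), if_neg h]

lemma toUpperAux_eq (cs : List Char) (idx : Int) (acc : List Char) (h0 : 0 ≤ idx) :
    toUpperAux cs idx acc = acc ++ (cs.drop idx.toNat).map upCharB := by
  fun_induction toUpperAux cs idx acc with
  | case1 idx acc h ch code ih =>
    simp only [ch, code] at *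
    simp only [dite_eq_ite] at ih ⊢
    rw [ih (by omega)]
    have hlt : idx.toNat < cs.length := by omega
    rw [List.drop_eq_getElem_cons hlt, PySem.List.pyGetD_eq_getElem cs ' ' h0 h]
    have h1 : (idx + 1).toNat = idx.toNat + 1 := by omega
    rw [h1, List.map_cons]
    simp only [List.append_assoc, List.singleton_append]
    rw [upCharB_eq]
  | case2 idx h =>
    have : cs.length ≤ idx.toNat := by omega
    simp [List.drop_eq_nil_of_le this]

lemma to_upper_eq (cs : List Char) : to_upper cs = cs.map upCharB := by
  rw [to_upper, toUpperAux_eq cs 0 [] le_rfl]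
  simp

lemma getD_sevTable (u : List Char) :
    sevTable.getD u 0 =
      if u = "DEBUG".toList then 1
      else if u = "INFO".toList then 2
      else if u = "WARN".toList then 3
      else if u = "WARNING".toList then 3
      else if u = "ERROR".toList then 4
      else if u = "FATAL".toList then 5
      else if u = "CRITICAL".toList then 5
      else 0 := by
  have hmk : sevTable = PySem.Dict.mk
      [("DEBUG".toList, 1), ("INFO".toList, 2), ("WARN".toList, 3), ("WARNING".toList, 3),
       ("ERROR".toList, 4), ("FATAL".toList, 5), ("CRITICAL".toList, 5)] := by decide
  rw [hmk, PySem.Dict.getD]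
  simp only [PySem.Dict.get?_mk_cons, beq_iff_eq]
  by_cases h1 : u = "DEBUG".toList
  · simp [h1]
  rw [if_neg (fun h => h1 h.symm), if_neg h1]
  by_cases h2 : u = "INFO".toList
  · simp [h2]
  rw [if_neg (fun h => h2 h.symm), if_neg h2]
  by_cases h3 : u = "WARN".toList
  · simp [h3]
  rw [if_neg (fun h => h3 h.symm), if_neg h3]
  by_cases h4 : u = "WARNING".toList
  · simp [h4]
  rw [if_neg (fun h => h4 h.symm), if_neg h4]
  by_cases h5 : u = "ERROR".toList
  · simp [h5]
  rw [if_neg (fun h => h5 h.symm), if_neg h5]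
  by_cases h6 : u = "FATAL".toList
  · simp [h6]
  rw [if_neg (fun h => h6 h.symm), if_neg h6]
  by_cases h7 : u = "CRITICAL".toList
  · simp [h7]
  rw [if_neg (fun h => h7 h.symm), if_neg h7]
  rfl

lemma classify_eq (l : List Char) : classify_severity l = classify_b l := by
  rw [classify_severity, classify_b, getD_sevTable, to_upper_eq]
  split_ifs <;> simp_all

lemma classify_b_range (l : List Char) : 0 ≤ classify_b l ∧ classify_b l < 6 := by
  rw [classify_b, getD_sevTable]
  split_ifs <;> omega

-- A's counting loop: each step bumps index s (0 ≤ s < length) by one.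
lemma bump_fold (xs : List Int) :
    ∀ (c : List Int), (∀ s ∈ xs, 0 ≤ s ∧ s.toNat < c.length) →
      (xs.foldl (fun counts s =>
          PySem.List.pySetD counts s (PySem.List.pyGetD counts s 0 + 1)) c).length = c.length ∧
      ∀ j : Nat, j < c.length →
        (xs.foldl (fun counts s =>
            PySem.List.pySetD counts s (PySem.List.pyGetD counts s 0 + 1)) c).getD j 0 =
          c.getD j 0 + (xs.count (j : Int) : Int) := by
  induction xs with
  | nil => intro c _; simp
  | cons x xs ih =>
    intro c hmem
    obtain ⟨hx0, hxl⟩ := hmem x (by simp)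
    have hset : PySem.List.pySetD c x (PySem.List.pyGetD c x 0 + 1) =
        c.set x.toNat (c.getD x.toNat 0 + 1) := by
      rw [PySem.List.pySetD_of_nonneg c _ hx0,
        PySem.List.pyGetD_eq_getElem c 0 hx0 (by omega)]
      rw [List.getD_eq_getElem?_getD, List.getElem?_eq_getElem hxl]
      rfl
    have hlen : (c.set x.toNat (c.getD x.toNat 0 + 1)).length = c.length := by simp
    obtain ⟨ihlen, ihget⟩ := ih (c.set x.toNat (c.getD x.toNat 0 + 1))
      (fun s hs => by
        have := hmem s (by simp [hs])
        simpa [hlen] using this)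
    refine ⟨by simp only [List.foldl_cons, hset]; rw [ihlen, hlen], ?_⟩
    intro j hj
    have hget : (c.set x.toNat (c.getD x.toNat 0 + 1)).getD j 0 =
        if x.toNat = j then c.getD j 0 + 1 else c.getD j 0 := by
      rw [List.getD_eq_getElem?_getD, List.getElem?_set]
      by_cases hxj : x.toNat = j
      · rw [if_pos hxj, if_pos (by omega)]
        subst hxj
        simp [List.getD_eq_getElem?_getD]
      · rw [if_neg hxj, if_neg hxj, List.getD_eq_getElem?_getD]
    have hcnt : (((x :: xs).count (j : Int) : Nat) : Int) =
        ((xs.count (j : Int) : Nat) : Int) + (if x.toNat = j then 1 else 0) := by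
      rw [List.count_cons]
      by_cases hxj : x = (j : Int)
      · rw [if_pos (by simp [hxj]), if_pos (by omega)]
        push_cast
        ring
      · rw [if_neg (by simpa using hxj), if_neg (by omega)]
        push_cast
        ring

    simp only [List.foldl_cons, hset]
    rw [ihget j (by omega), hget, hcnt]
    by_cases hxj : x.toNat = j <;> simp [hxj] <;> ring

-- B's distribution loop over (level, multiplicity) pairs.
lemma pair_fold (ps : List (List Char × Int)) :
    ∀ (c : List Int), (∀ p ∈ ps, (classify_b p.1).toNat < c.length) →
      (ps.foldl (fun counts p =>
          PySem.List.pySetD counts (classify_b p.1)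
            (PySem.List.pyGetD counts (classify_b p.1) 0 + p.2)) c).length = c.length ∧
      ∀ j : Nat, j < c.length →
        (ps.foldl (fun counts p =>
            PySem.List.pySetD counts (classify_b p.1)
              (PySem.List.pyGetD counts (classify_b p.1) 0 + p.2)) c).getD j 0 =
          c.getD j 0 + (ps.map (fun p => if (classify_b p.1).toNat = j then p.2 else 0)).sum := by
  induction ps with
  | nil => intro c _; simp
  | cons p ps ih =>
    intro c hmem
    have hx0 : 0 ≤ classify_b p.1 := (classify_b_range p.1).1
    have hxl : (classify_b p.1).toNat < c.length := hmem p (by simp)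
    have hset : PySem.List.pySetD c (classify_b p.1)
          (PySem.List.pyGetD c (classify_b p.1) 0 + p.2) =
        c.set (classify_b p.1).toNat (c.getD (classify_b p.1).toNat 0 + p.2) := by
      rw [PySem.List.pySetD_of_nonneg c _ hx0,
        PySem.List.pyGetD_eq_getElem c 0 hx0 (by omega)]
      rw [List.getD_eq_getElem?_getD, List.getElem?_eq_getElem hxl]
      rfl
    have hlen : (c.set (classify_b p.1).toNat (c.getD (classify_b p.1).toNat 0 + p.2)).length
        = c.length := by simp
    obtain ⟨ihlen, ihget⟩ := ih
      (c.set (classify_b p.1).toNat (c.getD (classify_b p.1).toNat 0 + p.2))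
      (fun q hq => by
        have := hmem q (by simp [hq])
        simpa [hlen] using this)
    refine ⟨by simp only [List.foldl_cons, hset]; rw [ihlen, hlen], ?_⟩
    intro j hj
    have hget : (c.set (classify_b p.1).toNat (c.getD (classify_b p.1).toNat 0 + p.2)).getD j 0 =
        if (classify_b p.1).toNat = j then c.getD j 0 + p.2 else c.getD j 0 := by
      rw [List.getD_eq_getElem?_getD, List.getElem?_set]
      by_cases hxj : (classify_b p.1).toNat = j
      · rw [if_pos hxj, if_pos (by omega)]
        subst hxj
        simp [List.getD_eq_getElem?_getD]
      · rw [if_neg hxj, if_neg hxj, List.getD_eq_getElem?_getD]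
    simp only [List.foldl_cons, hset]
    rw [ihget j (by omega), hget, List.map_cons, List.sum_cons]
    by_cases hxj : (classify_b p.1).toNat = j <;> simp [hxj] <;> ring

lemma sum_delta (x : List Char) (f : List Char → Int) :
    ∀ (K : List (List Char)), K.Nodup → x ∈ K →
      (K.map (fun k => if k = x then f k else 0)).sum = f x := by
  intro K
  induction K with
  | nil => intro _ h; simp at h
  | cons a K ih =>
    intro hnd hmem
    simp only [List.map_cons, List.sum_cons]
    by_cases hax : a = x
    · subst hax
      rw [if_pos rfl]
      have : (K.map (fun k => if k = a then f k else 0)).sum = 0 := by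
        apply List.sum_eq_zero
        intro y hy
        obtain ⟨k, hk, hky⟩ := List.mem_map.mp hy
        have : k ≠ a := fun h => (List.nodup_cons.mp hnd).1 (h ▸ hk)
        simp [this] at hky
        omega
      rw [this]
      ring
    · rw [if_neg hax]
      have hxK : x ∈ K := by
        rcases List.mem_cons.mp hmem with h | h
        · exact absurd h.symm hax
        · exact h
      rw [ih (List.nodup_cons.mp hnd).2 hxK]
      ring

-- grouping: summing each distinct level's multiplicity equals counting the lines directly
lemma group_count (j : Nat) (L : List (List Char)) :
    ∀ (K : List (List Char)), K.Nodup → (∀ x ∈ L, x ∈ K) →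
      (K.map (fun k => if (classify_b k).toNat = j then (L.count k : Int) else 0)).sum =
        (L.countP (fun k => (classify_b k).toNat == j) : Int) := by
  induction L with
  | nil => intro K _ _; simp
  | cons x L ih =>
    intro K hnd hcov
    have hxK : x ∈ K := hcov x (by simp)
    have hstep : ∀ k ∈ K,
        (if (classify_b k).toNat = j then (((x :: L).count k : Nat) : Int) else 0) =
          (if (classify_b k).toNat = j then ((L.count k : Nat) : Int) else 0) +
          (if k = x then (if (classify_b x).toNat = j then (1 : Int) else 0) else 0) := by
      intro k _
      by_cases hkx : k = x
      · subst hkx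
        rw [List.count_cons_self]
        by_cases hcl : (classify_b k).toNat = j <;> simp [hcl]
      · simp [Ne.symm hkx, hkx]
    rw [List.map_congr_left hstep, List.sum_map_add]
    rw [ih K hnd (fun y hy => hcov y (by simp [hy]))]
    rw [sum_delta x _ K hnd hxK]
    rw [List.countP_cons]
    by_cases hcl : (classify_b x).toNat = j
    · simp [hcl]
    · simp [hcl]


lemma getElem?_of_len6 (l : List Int) (i : Nat) (hl : l.length = 6) (hi : i < 6) :
    l[i]? = some (l.getD i 0) := by
  rw [List.getD_eq_getElem?_getD, List.getElem?_eq_getElem (by omega)]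
  rfl

-- ===== VERDICT (by name: the statement is the Claim_ definition above) =====
theorem count_by_severity_spec : Claim_equal_count_by_severity := by
  unfold Claim_equal_count_by_severity
  intro lines _
  unfold Spec_count_by_severity
  have hA : count_by_severity lines =
      ((lines.map (fun line => parse_level_b line.toList)).map classify_b).foldl
        (fun counts s => PySem.List.pySetD counts s (PySem.List.pyGetD counts s 0 + 1))
        [0, 0, 0, 0, 0, 0] := by
    rw [count_by_severity, List.map_map, List.foldl_map]
    apply PySem.List.foldl_congr_mem
    intro acc l _
    simp only [Function.comp, parse_eq, classify_eq]
  have hB : count_by_severity_alt lines =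
      ((PySem.Set.ofList (lines.map (fun line => parse_level_b line.toList))).map
        (fun k => (k, ((lines.map (fun line => parse_level_b line.toList)).count k : Int)))).foldl
        (fun counts p =>
          PySem.List.pySetD counts (classify_b p.1)
            (PySem.List.pyGetD counts (classify_b p.1) 0 + p.2))
        [0, 0, 0, 0, 0, 0] := by
    rw [count_by_severity_alt]
    simp only [PySem.Dict.foldl_insert_getD_add_one_eq_counter, PySem.Dict.items_counter]
  set levels := lines.map (fun line => parse_level_b line.toList) with hlev
  obtain ⟨hAlen, hAget⟩ := bump_fold (levels.map classify_b) [0, 0, 0, 0, 0, 0]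
    (by
      intro s hs
      obtain ⟨k, _, rfl⟩ := List.mem_map.mp hs
      have := classify_b_range k
      refine ⟨this.1, ?_⟩
      simp only [List.length_cons, List.length_nil]
      omega)
  obtain ⟨hBlen, hBget⟩ := pair_fold
    ((PySem.Set.ofList levels).map (fun k => (k, (levels.count k : Int)))) [0, 0, 0, 0, 0, 0]
    (by
      intro p _
      have := classify_b_range p.1
      simp only [List.length_cons, List.length_nil]
      omega)
  rw [hA, hB]
  apply List.ext_getElem?
  intro i
  by_cases hi : i < 6
  · rw [getElem?_of_len6 _ i (by rw [hAlen]; rfl) hi, getElem?_of_len6 _ i (by rw [hBlen]; rfl) hi]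
    rw [hAget i (by simpa using hi), hBget i (by simpa using hi)]
    congr 1
    have hR : (List.map (fun p => if (classify_b p.1).toNat = i then p.2 else 0)
          (List.map (fun k => (k, (levels.count k : Int))) (PySem.Set.ofList levels))).sum
        = ((levels.countP (fun k => (classify_b k).toNat == i) : Nat) : Int) := by
      simp only [List.map_map]
      exact group_count i levels (PySem.Set.ofList levels) (PySem.Set.nodup_ofList _)
        (fun x hx => (PySem.Set.mem_ofList _ _).mpr hx)
    rw [hR, List.count_eq_countP, List.countP_map]
    have hP : List.countP ((fun x => x == ((i : Nat) : Int)) ∘ classify_b) levels =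
        List.countP (fun k => (classify_b k).toNat == i) levels := by
      apply List.countP_congr
      intro k _
      have := classify_b_range k
      simp only [Function.comp_apply, beq_iff_eq]
      omega
    rw [hP]
  · rw [List.getElem?_eq_none, List.getElem?_eq_none]
    · rw [hBlen]
      simp only [List.length_cons, List.length_nil]
      omega
    · rw [hAlen]
      simp only [List.length_cons, List.length_nil]
      omega
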